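-- pv_equiv track=rewrite | github.com/gudrunhe/gosam | src/python/golem/model/calchep.py | qgraf_escape
-- ===== SOURCE A (Python) =====
-- def qgraf_escape(s):
-- 	"""
-- 	Escape all characters which are not Qgraf-conform.
--
-- 	Qgraf allows only [A-Za-z0-9_] in names and no digit
-- 	as the first letter.
--
-- 	Here, we make the following replacements:
--
-- 	'_' -> '__'
-- 	'+' -> '_0P_'
-- 	'-' -> '_0M_'
-- 	'.' + [^_A-Za-z] -> '_' + esc([^_0-7])
-- 	[^_.A-Za-z0-9] -> '_' + oct([^_.A-Za-z0-9]) + '_'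
-- 	"""
--
-- 	res = ""
-- 	l = len(s)
-- 	fmt = '_%03o_'
-- 	for i in range(l):
-- 		ch = s[i:i+1]
-- 		if ch == '_':
-- 			res += '__'
-- 		elif ch == '+':
-- 			res += "_0P_"
-- 		elif ch == '-':
-- 			res += "_0M_"
-- 		elif ch == '.':
-- 			if (i < l - 1) and not s[i+1:i+2].isalpha():
-- 				res += fmt % ord(ch)
-- 			else:
-- 				res += '_'
-- 		elif ch.isalnum():
-- 			res += ch
-- 		else:
-- 			res += fmt % ord(ch)
--
-- 	if not res[0:1].isalpha():
-- 		res = "X_0_X_" + res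
-- 	return res
-- ===== SOURCE B (Python) =====
-- def qgraf_escape(s):
--     # staged passes instead of one indexed scan: split on '.', precompute a
--     # translation table for the dot-free pieces, then assemble the result
--     # back-to-front, carrying the escape that replaces the dot in front of
--     # the piece handled last
--     parts = s.split('.')
--     trans = {ord('_'): '__', ord('+'): '_0P_', ord('-'): '_0M_'}
--     for ch in set(s):
--         o = ord(ch)
--         if o not in trans and ch != '.':
--             trans[o] = ch if ch.isalnum() else '_%03o_' % o
--     *init, lastp = parts
--     res = lastp.translate(trans)
--     sep = '_' if (lastp[:1].isalpha() or lastp == '') else '_%03o_' % 46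
--     for p in reversed(init):
--         res = p.translate(trans) + sep + res
--         sep = '_' if p[:1].isalpha() else '_%03o_' % 46
--     return res if res[:1].isalpha() else 'X_0_X_' + res
-- ===== Notes on version B (the rewrite author's own statement) =====
-- stated objective: alternative
-- what changed: Replaced A's single indexed scan with per-character lookahead by staged passes: split the string on '.', build a translation table once for all non-dot characters, translate each dot-free piece through it, and assemble the result back-to-front while carrying the escape that stands for the dot in front of the piece just handled.
import Mathlib
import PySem

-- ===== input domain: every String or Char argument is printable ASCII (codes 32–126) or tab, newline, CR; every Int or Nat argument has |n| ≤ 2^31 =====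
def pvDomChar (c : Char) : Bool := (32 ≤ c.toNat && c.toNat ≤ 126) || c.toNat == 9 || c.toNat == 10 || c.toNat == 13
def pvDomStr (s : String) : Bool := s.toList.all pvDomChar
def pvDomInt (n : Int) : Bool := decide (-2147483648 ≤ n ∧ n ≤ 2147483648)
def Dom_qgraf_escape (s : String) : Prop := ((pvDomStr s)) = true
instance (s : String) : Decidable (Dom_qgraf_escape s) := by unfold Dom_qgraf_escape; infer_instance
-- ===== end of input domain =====

-- B replaces A's single indexed scan with per-character lookahead by staged passes: split on '.',
-- translate the dot-free pieces through a precomputed table, assemble back-to-front; objective: alternative.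

-- shared formatting helper: exact port of Python's '_%03o_' % n for 0 ≤ n < 512
-- (every character admitted by Dom_qgraf_escape has code ≤ 126, so the 3-digit zero-padded form is exact)
def oct3 (n : Nat) : List Char :=
  ['_', Char.ofNat (48 + n / 64 % 8), Char.ofNat (48 + n / 8 % 8), Char.ofNat (48 + n % 8), '_']

-- ===== PORT A =====
def qgraf_escape (s : String) : String :=
  let cs := s.toList
  let l : Int := (PySem.Chars.len cs : Int)
  let res : List Char :=
    (PySem.List.pyRange 0 l).foldl (fun res i =>
      let ch := PySem.List.slice cs (some i) (some (i + 1))   -- ch = s[i:i+1]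
      if ch = ['_'] then res ++ ['_','_']
      else if ch = ['+'] then res ++ ['_','0','P','_']
      else if ch = ['-'] then res ++ ['_','0','M','_']
      else if ch = ['.'] then
        if i < l - 1 ∧ PySem.Chars.strIsalpha (PySem.List.slice cs (some (i + 1)) (some (i + 2))) = false
        then res ++ oct3 46                                   -- fmt % ord('.')
        else res ++ ['_']
      else if PySem.Chars.strIsalnum ch then res ++ ch
      else res ++ oct3 ch.headI.toNat) []                     -- fmt % ord(ch); ch is one char for 0 ≤ i < l
  let res := if PySem.Chars.strIsalpha (PySem.List.slice res (some 0) (some 1)) then res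
             else ['X','_','0','_','X','_'] ++ res
  String.ofList res

-- ===== PORT B =====
-- the body of Source B's table-building loop ('if o not in trans and ch != '.': trans[o] = …')
def transStep (d : PySem.Dict Int (List Char)) (ch : Char) : PySem.Dict Int (List Char) :=
  if d.contains ((ch.toNat : Int)) = false ∧ ch ≠ '.' then
    d.insert ((ch.toNat : Int)) (if PySem.Chars.isalnum ch then [ch] else oct3 ch.toNat)
  else d

-- '_' if p[:1].isalpha() else '_%03o_' % 46  (the escape replacing a dot, from the piece after it)
def dotSep (p : List Char) : List Char :=
  if PySem.Chars.strIsalpha (PySem.List.slice p none (some 1)) then ['_'] else oct3 46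

-- the initial separator: '_' if (lastp[:1].isalpha() or lastp == '') else '_%03o_' % 46
def sep0 (p : List Char) : List Char :=
  if PySem.Chars.strIsalpha (PySem.List.slice p none (some 1)) ∨ p = [] then ['_'] else oct3 46

-- hand port of p.translate(trans): each char replaced by its table entry, absent keys kept (exact)
def pyTranslate (d : PySem.Dict Int (List Char)) (p : List Char) : List Char :=
  p.flatMap (fun c => d.getD ((c.toNat : Int)) [c])

def qgraf_escape_alt (s : String) : String :=
  let cs := s.toList
  let parts := PySem.Chars.splitOn cs ['.']                   -- s.split('.')
  let trans := (PySem.Set.ofList cs).foldl transStep          -- for ch in set(s): …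
    (PySem.Dict.ofList [((95:Int), ['_','_']), ((43:Int), ['_','0','P','_']), ((45:Int), ['_','0','M','_'])])
  let lastp := parts.getLastD []                              -- `*init, lastp = parts`; parts is never empty
  let init := parts.dropLast
  let st := init.reverse.foldl                                -- for p in reversed(init): …
    (fun (st : List Char × List Char) p => (pyTranslate trans p ++ st.2 ++ st.1, dotSep p))
    (pyTranslate trans lastp, sep0 lastp)
  let res := st.1
  String.ofList (if PySem.Chars.strIsalpha (PySem.List.slice res none (some 1)) then res
                 else ['X','_','0','_','X','_'] ++ res)

-- ===== PRECONDITION & SPEC =====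
def Spec_qgraf_escape (s : String) (out : String) : Prop := out = qgraf_escape_alt s
instance (s : String) (out : String) : Decidable (Spec_qgraf_escape s out) := by unfold Spec_qgraf_escape; infer_instance

-- ===== CLAIM (what is proved, stated in full; the proofs are below) =====
def Claim_equal_qgraf_escape : Prop := ∀ (s : String), Dom_qgraf_escape s → Spec_qgraf_escape s (qgraf_escape s)

-- ===== LEMMAS AND PROOFS =====

-- the context-free per-character escape both programs implement for characters other than '.'
def escCF (c : Char) : List Char :=
  if c = '_' then ['_','_']
  else if c = '+' then ['_','0','P','_']
  else if c = '-' then ['_','0','M','_']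
  else if PySem.Chars.isalnum c then [c]
  else oct3 c.toNat

-- the per-character escape of A including the '.' lookahead, as a function of char and successor
def altEsc (c : Char) (next? : Option Char) : List Char :=
  if c = '_' then ['_','_']
  else if c = '+' then ['_','0','P','_']
  else if c = '-' then ['_','0','M','_']
  else if c = '.' then
    match next? with
    | none => ['_']
    | some n => if PySem.Chars.isalpha n then ['_'] else oct3 46
  else if PySem.Chars.isalnum c then [c]
  else oct3 c.toNat

def altGo : List Char → List Char
  | [] => []
  | c :: rest => altEsc c rest.head? ++ altGo rest

-- A's loop body at index i, as a pure piece (the loop only appends)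
def pieceA (cs : List Char) (i : Int) : List Char :=
  let l : Int := (PySem.Chars.len cs : Int)
  let ch := PySem.List.slice cs (some i) (some (i + 1))
  if ch = ['_'] then ['_','_']
  else if ch = ['+'] then ['_','0','P','_']
  else if ch = ['-'] then ['_','0','M','_']
  else if ch = ['.'] then
    if i < l - 1 ∧ PySem.Chars.strIsalpha (PySem.List.slice cs (some (i + 1)) (some (i + 2))) = false
    then oct3 46
    else ['_']
  else if PySem.Chars.strIsalnum ch then ch
  else oct3 ch.headI.toNat

lemma strIsalpha_singleton (c : Char) : PySem.Chars.strIsalpha [c] = PySem.Chars.isalpha c := by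
  simp [PySem.Chars.strIsalpha]

lemma strIsalnum_singleton (c : Char) : PySem.Chars.strIsalnum [c] = PySem.Chars.isalnum c := by
  simp [PySem.Chars.strIsalnum]

lemma slice_one (xs : List Char) (k : Nat) :
    PySem.List.slice xs (some (k : Int)) (some ((k : Int) + 1)) = (xs.drop k).take 1 := by
  have := PySem.List.slice_natCast xs k (k + 1)
  simpa using this

lemma pieceA_shift (c : Char) (cs : List Char) (k : Nat) :
    pieceA (c :: cs) ((k : Int) + 1) = pieceA cs (k : Int) := by
  have h1 : PySem.List.slice (c :: cs) (some ((k : Int) + 1)) (some (((k : Int) + 1) + 1))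
      = PySem.List.slice cs (some (k : Int)) (some ((k : Int) + 1)) := by
    have ha := slice_one (c :: cs) (k + 1)
    have hb := slice_one cs k
    push_cast at ha
    rw [ha, hb]; simp
  have h2 : PySem.List.slice (c :: cs) (some ((k : Int) + 1 + 1)) (some ((k : Int) + 1 + 2))
      = PySem.List.slice cs (some ((k : Int) + 1)) (some ((k : Int) + 2)) := by
    have ha := slice_one (c :: cs) (k + 2)
    have hb := slice_one cs (k + 1)
    push_cast at ha hb
    rw [show ((k : Int) + 1 + 1) = ((k : Int) + 2) by ring,
        show ((k : Int) + 1 + 2) = ((k : Int) + 2 + 1) by ring, ha,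
        show ((k : Int) + 2) = ((k : Int) + 1 + 1) by ring, hb]
    simp
  have hcond : ((k : Int) + 1 < (PySem.Chars.len (c :: cs) : Int) - 1) ↔ ((k : Int) < (PySem.Chars.len cs : Int) - 1) := by
    simp [PySem.Chars.len_eq]; omega
  simp only [pieceA, h1, h2, hcond]

lemma pieceA_zero (c : Char) (cs : List Char) :
    pieceA (c :: cs) 0 = altEsc c cs.head? := by
  have h1 : PySem.List.slice (c :: cs) (some 0) (some (0 + 1)) = [c] := by
    have := slice_one (c :: cs) 0
    simpa using this
  have h2 : PySem.List.slice (c :: cs) (some ((0 : Int) + 1)) (some ((0 : Int) + 2)) = cs.take 1 := by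
    have := slice_one (c :: cs) 1
    push_cast at this
    rw [show ((0 : Int) + 1) = (1 : Int) by ring, show ((0 : Int) + 2) = (2 : Int) by ring, this]
    simp
  cases cs with
  | nil =>
    simp only [pieceA, altEsc, h1]
    simp [PySem.Chars.len_eq, strIsalnum_singleton]
  | cons n t =>
    simp only [pieceA, altEsc, h1, h2]
    have hl : (0 : Int) < (PySem.Chars.len (c :: n :: t) : Int) - 1 := by
      simp [PySem.Chars.len_eq]
    simp only [List.take, List.head?, hl, true_and, strIsalpha_singleton, strIsalnum_singleton]
    by_cases hc : c = '.'
    · subst hc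
      by_cases hn : PySem.Chars.isalpha n = true
      · simp [hn]
      · simp [hn]
    · simp [hc]

lemma flatMap_pieceA (cs : List Char) :
    List.flatMap (pieceA cs) (List.map (fun k : Nat => (k : Int)) (List.range cs.length)) = altGo cs := by
  induction cs with
  | nil => simp [altGo]
  | cons c rest ih =>
    rw [show (c :: rest).length = rest.length + 1 from rfl, List.range_succ_eq_map]
    rw [show altGo (c :: rest) = altEsc c rest.head? ++ altGo rest from rfl]
    simp only [List.map_cons, List.map_map, List.flatMap_cons, Nat.cast_zero, pieceA_zero]
    congr 1
    rw [← ih, List.flatMap_map, List.flatMap_map]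
    apply List.flatMap_congr
    intro k _
    have := pieceA_shift c rest k
    simpa [Function.comp, Nat.succ_eq_add_one] using this

lemma loop_eq (cs : List Char) :
    (PySem.List.pyRange 0 ((PySem.Chars.len cs : Int))).foldl (fun res i =>
      let ch := PySem.List.slice cs (some i) (some (i + 1))
      if ch = ['_'] then res ++ ['_','_']
      else if ch = ['+'] then res ++ ['_','0','P','_']
      else if ch = ['-'] then res ++ ['_','0','M','_']
      else if ch = ['.'] then
        if i < (PySem.Chars.len cs : Int) - 1 ∧ PySem.Chars.strIsalpha (PySem.List.slice cs (some (i + 1)) (some (i + 2))) = false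
        then res ++ oct3 46
        else res ++ ['_']
      else if PySem.Chars.strIsalnum ch then res ++ ch
      else res ++ oct3 ch.headI.toNat) [] = altGo cs := by
  have hb : (fun (res : List Char) (i : Int) =>
      let ch := PySem.List.slice cs (some i) (some (i + 1))
      if ch = ['_'] then res ++ ['_','_']
      else if ch = ['+'] then res ++ ['_','0','P','_']
      else if ch = ['-'] then res ++ ['_','0','M','_']
      else if ch = ['.'] then
        if i < (PySem.Chars.len cs : Int) - 1 ∧ PySem.Chars.strIsalpha (PySem.List.slice cs (some (i + 1)) (some (i + 2))) = false
        then res ++ oct3 46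
        else res ++ ['_']
      else if PySem.Chars.strIsalnum ch then res ++ ch
      else res ++ oct3 ch.headI.toNat) = fun res i => res ++ pieceA cs i := by
    funext res i
    simp only [pieceA]
    split_ifs <;> rfl
  rw [hb, PySem.List.foldl_append_eq_flatMap, PySem.Chars.len_eq,
      PySem.List.pyRange_zero_natCast]
  simpa using flatMap_pieceA cs

lemma take_one_eq (r : List Char) :
    PySem.List.slice r (some 0) (some 1) = PySem.List.slice r none (some 1) := by
  rw [PySem.List.slice_to r (by norm_num : (0:Int) ≤ 1)]
  have := slice_one r 0
  simpa using this

-- ---------- B side ----------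

lemma char_toNat_inj {a b : Char} (h : a.toNat = b.toNat) : a = b := by
  apply Char.ext
  exact UInt32.toNat_inj.mp h

lemma key_eq_iff (a b : Char) : ((a.toNat : Int) = (b.toNat : Int)) ↔ a = b := by
  constructor
  · intro h; exact char_toNat_inj (by exact_mod_cast h)
  · intro h; rw [h]

-- the translation table is correct and total on the non-dot characters of its source
def GoodT (d : PySem.Dict Int (List Char)) : Prop :=
  (∀ (c : Char) (v : List Char), d.get? (c.toNat : Int) = some v → v = escCF c)
  ∧ (d.get? 95).isSome ∧ (d.get? 43).isSome ∧ (d.get? 45).isSome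

lemma isSome_insert (d : PySem.Dict Int (List Char)) (k k' : Int) (v : List Char)
    (h : (d.get? k).isSome) : ((d.insert k' v).get? k).isSome := by
  by_cases hk : k = k'
  · subst hk; rw [PySem.Dict.get?_insert_self]; rfl
  · rw [PySem.Dict.get?_insert_of_ne d v hk]; exact h

lemma transStep_mono (d : PySem.Dict Int (List Char)) (ch : Char) (k : Int)
    (h : (d.get? k).isSome) : ((transStep d ch).get? k).isSome := by
  unfold transStep
  by_cases hc : d.contains ((ch.toNat : Int)) = false ∧ ch ≠ '.'
  · rw [if_pos hc]
    exact isSome_insert _ _ _ _ h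
  · rw [if_neg hc]
    exact h

lemma fold_mono (l : List Char) (d : PySem.Dict Int (List Char)) (k : Int)
    (h : (d.get? k).isSome) : ((l.foldl transStep d).get? k).isSome := by
  induction l generalizing d with
  | nil => exact h
  | cons x t ih => exact ih _ (transStep_mono d x k h)

lemma transStep_good (d : PySem.Dict Int (List Char)) (ch : Char)
    (h : GoodT d) : GoodT (transStep d ch) := by
  obtain ⟨hg, h95, h43, h45⟩ := h
  unfold transStep
  by_cases hc : d.contains ((ch.toNat : Int)) = false ∧ ch ≠ '.'
  swap
  · rw [if_neg hc]
    exact ⟨hg, h95, h43, h45⟩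
  · rw [if_pos hc]
    obtain ⟨hcon, hdot⟩ := hc
    have hne : ∀ (c0 : Char), ch = c0 → (d.get? (c0.toNat : Int)).isSome → False := by
      intro c0 he hs
      rw [PySem.Dict.contains_eq_isSome_get?, he, hs] at hcon
      simp at hcon
    have h1 : ch ≠ '_' := fun he => hne '_' he h95
    have h2 : ch ≠ '+' := fun he => hne '+' he h43
    have h3 : ch ≠ '-' := fun he => hne '-' he h45
    have hval : (if PySem.Chars.isalnum ch then [ch] else oct3 ch.toNat) = escCF ch := by
      simp [escCF, h1, h2, h3]
    refine ⟨?_, ?_, ?_, ?_⟩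
    · intro c v hv
      by_cases hk : (c.toNat : Int) = (ch.toNat : Int)
      · have hceq : c = ch := (key_eq_iff c ch).mp hk
        subst hceq
        rw [PySem.Dict.get?_insert_self] at hv
        have hv2 : (if PySem.Chars.isalnum c then [c] else oct3 c.toNat) = v :=
          Option.some_inj.mp hv
        exact hv2.symm.trans hval
      · rw [PySem.Dict.get?_insert_of_ne d _ hk] at hv
        exact hg c v hv
    · exact isSome_insert _ _ _ _ h95
    · exact isSome_insert _ _ _ _ h43
    · exact isSome_insert _ _ _ _ h45

lemma fold_good (l : List Char) (d : PySem.Dict Int (List Char))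
    (h : GoodT d) : GoodT (l.foldl transStep d) := by
  induction l generalizing d with
  | nil => exact h
  | cons x t ih => exact ih _ (transStep_good d x h)

lemma fold_cov (l : List Char) (d : PySem.Dict Int (List Char)) (c : Char)
    (hc : c ∈ l) (hdot : c ≠ '.') : ((l.foldl transStep d).get? (c.toNat : Int)).isSome := by
  induction l generalizing d with
  | nil => cases hc
  | cons x t ih =>
    rcases List.mem_cons.mp hc with hEq | hmem
    · rw [List.foldl_cons]
      apply fold_mono
      unfold transStep
      by_cases h : d.contains ((x.toNat : Int)) = false ∧ x ≠ '.'
      · rw [if_pos h, ← hEq, PySem.Dict.get?_insert_self]; rfl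
      · rw [if_neg h]
        have hcon : d.contains ((x.toNat : Int)) = true := by
          by_cases hcf : d.contains ((x.toNat : Int)) = false
          · exact absurd (And.intro hcf (hEq ▸ hdot)) h
          · simpa using hcf
        rw [PySem.Dict.contains_eq_isSome_get?] at hcon
        rw [← hEq] at hcon
        exact hcon
    · rw [List.foldl_cons]
      exact ih _ hmem

def trans0 : PySem.Dict Int (List Char) :=
  PySem.Dict.ofList [((95:Int), ['_','_']), ((43:Int), ['_','0','P','_']), ((45:Int), ['_','0','M','_'])]

lemma trans0_good : GoodT trans0 := by
  refine ⟨?_, by decide, by decide, by decide⟩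
  intro c v hv
  have hmk : trans0 = PySem.Dict.mk [((95:Int), ['_','_']), ((43:Int), ['_','0','P','_']), ((45:Int), ['_','0','M','_'])] := by
    decide
  rw [hmk] at hv
  rw [PySem.Dict.get?_mk_cons] at hv
  by_cases h95 : ((95:Int) == (c.toNat : Int)) = true
  · have hc : c = '_' := (key_eq_iff c '_').mp (by
      have h := eq_of_beq h95
      rw [show (('_' : Char).toNat) = 95 from rfl]
      exact h.symm)
    subst hc
    rw [if_pos (by decide : (((95:Int)) == ((('_' : Char).toNat : Int))) = true)] at hv
    have := Option.some_inj.mp hv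
    rw [← this]; decide
  · rw [if_neg h95, PySem.Dict.get?_mk_cons] at hv
    by_cases h43 : ((43:Int) == (c.toNat : Int)) = true
    · have hc : c = '+' := (key_eq_iff c '+').mp (by
        have h := eq_of_beq h43
        rw [show (('+' : Char).toNat) = 43 from rfl]
        exact h.symm)
      subst hc
      rw [if_pos (by decide : (((43:Int)) == ((('+' : Char).toNat : Int))) = true)] at hv
      have := Option.some_inj.mp hv
      rw [← this]; decide
    · rw [if_neg h43, PySem.Dict.get?_mk_cons] at hv
      by_cases h45 : ((45:Int) == (c.toNat : Int)) = true
      · have hc : c = '-' := (key_eq_iff c '-').mp (by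
          have h := eq_of_beq h45
          rw [show (('-' : Char).toNat) = 45 from rfl]
          exact h.symm)
        subst hc
        rw [if_pos (by decide : (((45:Int)) == ((('-' : Char).toNat : Int))) = true)] at hv
        have := Option.some_inj.mp hv
        rw [← this]; decide
      · rw [if_neg h45] at hv
        simp [PySem.Dict.get?] at hv

lemma table_lookup (cs : List Char) (c : Char) (hc : c ∈ cs) (hdot : c ≠ '.') :
    ((PySem.Set.ofList cs).foldl transStep trans0).getD ((c.toNat : Int)) [c] = escCF c := by
  have hmem : c ∈ PySem.Set.ofList cs := (PySem.Set.mem_ofList cs c).mpr hc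
  have hsome := fold_cov (PySem.Set.ofList cs) trans0 c hmem hdot
  have hgood := fold_good (PySem.Set.ofList cs) trans0 trans0_good
  obtain ⟨v, hv⟩ := Option.isSome_iff_exists.mp hsome
  have := hgood.1 c v hv
  subst this
  simp [PySem.Dict.getD, hv]

lemma translate_eq (d : PySem.Dict Int (List Char)) (p : List Char)
    (h : ∀ c ∈ p, d.getD ((c.toNat : Int)) [c] = escCF c) :
    pyTranslate d p = p.flatMap escCF := by
  unfold pyTranslate
  exact List.flatMap_congr h

-- ---------- splitOn bridge ----------

lemma go_spec (fuel : Nat) (l cur : List Char) (acc : List (List Char)) (h : l.length < fuel) :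
    PySem.Chars.splitOn.go ['.'] fuel l cur acc
      = acc.reverse ++ (List.splitOnP (fun c => c == '.') l).modifyHead (cur.reverse ++ ·) := by
  induction fuel generalizing l cur acc with
  | zero => omega
  | succ fuel ih =>
    cases l with
    | nil =>
      simp [PySem.Chars.splitOn.go, List.splitOnP_nil, List.modifyHead]
    | cons c rest =>
      by_cases hc : c = '.'
      · subst hc
        have hpre : List.isPrefixOf ['.'] ('.' :: rest) = true := by
          simp [List.isPrefixOf]
        rw [show PySem.Chars.splitOn.go ['.'] (fuel+1) ('.' :: rest) cur acc
              = PySem.Chars.splitOn.go ['.'] fuel (List.drop (['.'] : List Char).length ('.' :: rest)) [] (cur.reverse :: acc) by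
            simp [PySem.Chars.splitOn.go, hpre]]
        rw [show List.drop (['.'] : List Char).length ('.' :: rest) = rest by simp]
        rw [ih rest [] (cur.reverse :: acc) (by simpa using Nat.lt_of_succ_lt_succ h)]
        obtain ⟨p0, t, hpt⟩ := List.exists_cons_of_ne_nil (List.splitOnP_ne_nil (fun c => c == '.') rest)
        rw [List.splitOnP_cons]
        simp [hpt, List.modifyHead]
      · have hpre : List.isPrefixOf ['.'] (c :: rest) = false := by
          simp [List.isPrefixOf]
          intro hcc
          exact absurd hcc.symm hc
        rw [show PySem.Chars.splitOn.go ['.'] (fuel+1) (c :: rest) cur acc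
              = PySem.Chars.splitOn.go ['.'] fuel rest (c :: cur) acc by
            simp [PySem.Chars.splitOn.go, hpre]]
        rw [ih rest (c :: cur) acc (by simpa using Nat.lt_of_succ_lt_succ h)]
        obtain ⟨p0, t, hpt⟩ := List.exists_cons_of_ne_nil (List.splitOnP_ne_nil (fun c => c == '.') rest)
        rw [List.splitOnP_cons]
        simp [hpt, hc, List.modifyHead]

lemma splitOn_bridge (cs : List Char) :
    PySem.Chars.splitOn cs ['.'] = List.splitOn '.' cs := by
  unfold PySem.Chars.splitOn
  rw [go_spec (cs.length + 1) cs [] [] (by omega)]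
  rw [show List.splitOn '.' cs = List.splitOnP (fun c => c == '.') cs from rfl]
  obtain ⟨p0, t, hpt⟩ := List.exists_cons_of_ne_nil (List.splitOnP_ne_nil (fun c => c == '.') cs)
  rw [hpt]
  simp [List.modifyHead]

lemma parts_chars (cs : List Char) :
    ∀ p ∈ List.splitOn '.' cs, ∀ c ∈ p, c ∈ cs ∧ c ≠ '.' := by
  have key : ∀ (cs : List Char), ∀ p ∈ List.splitOnP (fun c => c == '.') cs, ∀ c ∈ p, c ∈ cs ∧ c ≠ '.' := by
    intro cs
    induction cs with
    | nil =>
      intro p hp c hc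
      rw [List.splitOnP_nil, List.mem_singleton] at hp
      subst hp; cases hc
    | cons x rest ih =>
      intro p hp c hc
      rw [List.splitOnP_cons] at hp
      by_cases hx : x = '.'
      · rw [if_pos (by simp [hx])] at hp
        rcases List.mem_cons.mp hp with hp | hp
        · subst hp; cases hc
        · have := ih p hp c hc
          exact ⟨List.mem_cons_of_mem x this.1, this.2⟩
      · rw [if_neg (by simp [hx])] at hp
        obtain ⟨p0, t, hpt⟩ := List.exists_cons_of_ne_nil (List.splitOnP_ne_nil (fun c => c == '.') rest)
        rw [hpt] at hp
        simp only [List.modifyHead] at hp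
        rcases List.mem_cons.mp hp with hp | hp
        · subst hp
          rcases List.mem_cons.mp hc with hcx | hcp
          · subst hcx
            exact ⟨List.mem_cons_self, hx⟩
          · have := ih p0 (by rw [hpt]; exact List.mem_cons_self) c hcp
            exact ⟨List.mem_cons_of_mem x this.1, this.2⟩
        · have := ih p (by rw [hpt]; exact List.mem_cons_of_mem p0 hp) c hc
          exact ⟨List.mem_cons_of_mem x this.1, this.2⟩
  intro p hp c hc
  exact key cs p hp c hc

-- ---------- assembling B ----------

def asmS (T : List Char → List Char) : List (List Char) → (List Char × List Char)
  | [] => ([], ['_'])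
  | [p] => (T p, sep0 p)
  | p :: q :: r =>
    (T p ++ (asmS T (q :: r)).2 ++ (asmS T (q :: r)).1, dotSep p)

lemma foldr_asm (T : List Char → List Char) (init : List (List Char)) (lastp : List Char) :
    init.foldr (fun p st => (T p ++ st.2 ++ st.1, dotSep p)) (T lastp, sep0 lastp)
      = asmS T (init ++ [lastp]) := by
  induction init with
  | nil => simp [asmS]
  | cons p t ih =>
    cases t with
    | nil => rfl
    | cons q r =>
      rw [List.foldr_cons, ih]
      rfl

lemma slice_take_one (p : List Char) : PySem.List.slice p none (some 1) = p.take 1 := by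
  rw [← take_one_eq]
  have h2 := slice_one p 0
  simpa using h2

lemma strIsalpha_take_one (h : Char) (t : List Char) :
    PySem.Chars.strIsalpha (PySem.List.slice (h :: t) none (some 1)) = PySem.Chars.isalpha h := by
  rw [slice_take_one]
  simp [strIsalpha_singleton]

lemma strIsalpha_nil_slice :
    PySem.Chars.strIsalpha (PySem.List.slice ([] : List Char) none (some 1)) = false := by
  rw [slice_take_one]
  decide

lemma altGo_dotfree_append (p t : List Char) (hp : '.' ∉ p) :
    altGo (p ++ t) = p.flatMap escCF ++ altGo t := by
  induction p with
  | nil => simp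
  | cons c p' ih =>
    have hc : c ≠ '.' := fun h => hp (h ▸ List.mem_cons_self)
    have hp' : '.' ∉ p' := fun h => hp (List.mem_cons_of_mem c h)
    rw [List.cons_append, show altGo (c :: (p' ++ t)) = altEsc c (p' ++ t).head? ++ altGo (p' ++ t) from rfl,
        ih hp']
    have : altEsc c (p' ++ t).head? = escCF c := by
      simp [altEsc, escCF, hc]
    rw [this]
    simp [List.flatMap_cons, List.append_assoc]

lemma intercalate_cons (p q : List Char) (r : List (List Char)) :
    (['.'] : List Char).intercalate (p :: q :: r) = p ++ '.' :: (['.'] : List Char).intercalate (q :: r) := by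
  simp [List.intercalate, List.intersperse]

lemma asm_main (T : List Char → List Char) (parts : List (List Char)) (hne : parts ≠ [])
    (hT : ∀ p ∈ parts, T p = p.flatMap escCF) (hdot : ∀ p ∈ parts, '.' ∉ p) :
    (asmS T parts).1 = altGo ((['.'] : List Char).intercalate parts)
    ∧ (asmS T parts).2 = altEsc '.' (((['.'] : List Char).intercalate parts).head?) := by
  induction parts with
  | nil => exact absurd rfl hne
  | cons p rest ih =>
    cases rest with
    | nil =>
      have h1 : (['.'] : List Char).intercalate [p] = p := by
        simp [List.intercalate, List.intersperse]
      constructor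
      · have h2 := altGo_dotfree_append p [] (hdot p List.mem_cons_self)
        simp only [List.append_nil] at h2
        rw [h1, show (asmS T [p]).1 = T p from rfl, hT p List.mem_cons_self, h2]
        simp [altGo]
      · rw [show (asmS T [p]).2 = sep0 p from rfl, h1]
        cases p with
        | nil => simp [sep0, altEsc, strIsalpha_nil_slice]
        | cons h t =>
          simp only [sep0, strIsalpha_take_one, List.head?]
          rw [show altEsc '.' (some h) = if PySem.Chars.isalpha h then ['_'] else oct3 46 by
            simp [altEsc]]
          by_cases ha : PySem.Chars.isalpha h = true
          · simp [ha]
          · simp [ha]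
    | cons q r =>
      have ihh := ih (by simp) (fun x hx => hT x (List.mem_cons_of_mem p hx))
        (fun x hx => hdot x (List.mem_cons_of_mem p hx))
      constructor
      · rw [show (asmS T (p :: q :: r)).1
              = T p ++ (asmS T (q :: r)).2 ++ (asmS T (q :: r)).1 from rfl]
        rw [intercalate_cons, altGo_dotfree_append p _ (hdot p List.mem_cons_self),
            show altGo ('.' :: (['.'] : List Char).intercalate (q :: r))
              = altEsc '.' ((['.'] : List Char).intercalate (q :: r)).head?
                ++ altGo ((['.'] : List Char).intercalate (q :: r)) from rfl]
        rw [hT p List.mem_cons_self, ihh.1, ihh.2]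
        simp [List.append_assoc]
      · rw [show (asmS T (p :: q :: r)).2 = dotSep p from rfl, intercalate_cons]
        cases p with
        | nil =>
          simp only [dotSep, strIsalpha_nil_slice, List.nil_append, List.head?]
          rw [show altEsc '.' (some '.') = oct3 46 by decide]
          simp
        | cons h t =>
          simp only [dotSep, strIsalpha_take_one, List.cons_append, List.head?]
          rw [show altEsc '.' (some h) = if PySem.Chars.isalpha h then ['_'] else oct3 46 by
            simp [altEsc]]

lemma parts_decomp : ∀ (parts : List (List Char)) (d : List Char), parts ≠ [] →
    parts.dropLast ++ [parts.getLastD d] = parts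
  | [], _, h => absurd rfl h
  | [_], _, _ => rfl
  | p :: q :: r, d, _ => by
    have ih := parts_decomp (q :: r) p (by simp)
    have e1 : (p :: q :: r).dropLast = p :: (q :: r).dropLast := rfl
    have e2 : (p :: q :: r).getLastD d = (q :: r).getLastD p := rfl
    rw [e1, e2, List.cons_append, ih]

-- ===== VERDICT (by name: the statement is the Claim_ definition above) =====
theorem qgraf_escape_spec : Claim_equal_qgraf_escape := by
  intro s _
  show qgraf_escape s = qgraf_escape_alt s
  unfold qgraf_escape qgraf_escape_alt
  dsimp only
  rw [loop_eq s.toList, take_one_eq, splitOn_bridge s.toList]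
  set cs := s.toList with hcs
  set parts := List.splitOn '.' cs with hparts
  have hne : parts ≠ [] := by
    rw [hparts]
    exact List.splitOnP_ne_nil _ cs
  set trans := (PySem.Set.ofList cs).foldl transStep
    (PySem.Dict.ofList [((95:Int), ['_','_']), ((43:Int), ['_','0','P','_']), ((45:Int), ['_','0','M','_'])]) with htrans
  have htrans0 : trans = (PySem.Set.ofList cs).foldl transStep trans0 := htrans
  have hT : ∀ p ∈ parts, pyTranslate trans p = p.flatMap escCF := by
    intro p hp
    apply translate_eq
    intro c hc
    rw [hparts] at hp
    have h2 := parts_chars cs p hp c hc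
    rw [htrans0]
    exact table_lookup cs c h2.1 h2.2
  have hdot : ∀ p ∈ parts, '.' ∉ p := by
    intro p hp hmem
    rw [hparts] at hp
    exact (parts_chars cs p hp '.' hmem).2 rfl
  rw [List.foldl_reverse]
  rw [foldr_asm (pyTranslate trans) parts.dropLast (parts.getLastD [])]
  rw [parts_decomp parts [] hne]
  rw [(asm_main (pyTranslate trans) parts hne hT hdot).1]
  rw [show (['.'] : List Char).intercalate parts = cs by
    rw [hparts]; exact List.intercalate_splitOn cs '.']
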